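-- pv_equiv track=rewrite | github.com/th2zz/algo_practice_problems | 2_two_pointers/core/two_sum_and_its_variant/triangle_count.py | two_sum_gt
-- ===== SOURCE A (Python) =====
-- def two_sum_gt(s, left, right, target):
--     """
--     找到target_index 左边  两数之和 > target_sum的组合的个数
--     """
--     res = 0
--     while left < right:
--         sum = s[left] + s[right]
--         if sum <= target:
--             left += 1
--         else:
--             res += right - left  # add in batch
--             right -= 1
--     return res
-- ===== SOURCE B (Python) =====
-- def _first_gt(s, need, lo, hi):
--     # first index j in [lo, hi) with s[j] > need (hi if none), s sorted on [lo, hi)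
--     while lo < hi:
--         mid = (lo + hi) // 2
--         if s[mid] <= need:
--             lo = mid + 1
--         else:
--             hi = mid
--     return lo
--
--
-- def two_sum_gt(s, left, right, target):
--     res = 0
--     for i in range(left, right):
--         j = _first_gt(s, target - s[i], i + 1, right + 1)
--         res += right + 1 - j
--     return res
-- ===== Notes on version B (the rewrite author's own statement) =====
-- stated objective: alternative
-- what changed: Replaces the coordinated converging two-pointer sweep by n independent binary searches: for each i in [left,right), a hand-written bisect finds the first j in (i,right] with s[j] > target - s[i] and adds right+1-j.
-- outside the precondition, e.g. on two_sum_gt([-3, 3, -2, 1], 0, 3, 2): A returns 2, B returns 1; on two_sum_gt([-3, -1], -1, 1, -4): A returns 2, B returns 1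
import Mathlib
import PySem

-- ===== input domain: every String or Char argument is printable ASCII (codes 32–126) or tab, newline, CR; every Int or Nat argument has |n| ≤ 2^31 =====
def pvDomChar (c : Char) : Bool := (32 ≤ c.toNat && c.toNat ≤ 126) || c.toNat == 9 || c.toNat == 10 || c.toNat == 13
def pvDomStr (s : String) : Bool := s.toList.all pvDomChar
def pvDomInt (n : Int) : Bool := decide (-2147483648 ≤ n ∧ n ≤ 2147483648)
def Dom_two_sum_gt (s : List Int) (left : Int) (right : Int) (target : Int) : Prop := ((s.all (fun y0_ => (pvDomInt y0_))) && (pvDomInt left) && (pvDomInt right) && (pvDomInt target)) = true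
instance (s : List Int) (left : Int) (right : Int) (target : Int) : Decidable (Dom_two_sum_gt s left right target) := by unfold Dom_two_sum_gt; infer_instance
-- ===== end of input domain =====

-- B replaces A's coordinated converging two-pointer sweep by an independent
-- binary search (first index with value > target - s[i]) for each left index i;
-- an alternative decomposition of the same count, not claimed faster.

-- ===== PORT A =====
-- the while-loop of A: state (left, right, res)
def twoSumGtGo (s : List Int) (target : Int) (left right res : Int) : Int :=
  if _h : left < right then
    match PySem.List.pyGet? s left, PySem.List.pyGet? s right with
    | some a, some b =>
        if a + b ≤ target then twoSumGtGo s target (left + 1) right res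
        else twoSumGtGo s target left (right - 1) (res + (right - left))
    | _, _ => res   -- IndexError in Python: excluded by Pre_two_sum_gt
  else res
termination_by (right - left).toNat
decreasing_by all_goals omega

def two_sum_gt (s : List Int) (left : Int) (right : Int) (target : Int) : Int :=
  twoSumGtGo s target left right 0

-- ===== PORT B =====
-- Source B's _first_gt: first j in [lo,hi) with s[j] > need (hi if none)
def firstGt (s : List Int) (need lo hi : Int) : Int :=
  if _h : lo < hi then
    match PySem.List.pyGet? s (PySem.Int.floordiv (lo + hi) 2) with
    | some v =>
        if v ≤ need then firstGt s need (PySem.Int.floordiv (lo + hi) 2 + 1) hi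
        else firstGt s need lo (PySem.Int.floordiv (lo + hi) 2)
    | none => lo   -- IndexError in Python: excluded by Pre_two_sum_gt
  else lo
termination_by (hi - lo).toNat
decreasing_by
  · have h2 := (PySem.Int.le_floordiv_iff_mul_le (a := lo + hi) (b := 2) (q := lo) (by omega)).mpr (by omega)
    omega
  · have h2 := (PySem.Int.floordiv_lt_iff_lt_mul (a := lo + hi) (b := 2) (q := hi) (by omega)).mpr (by omega)
    omega

def two_sum_gt_alt (s : List Int) (left : Int) (right : Int) (target : Int) : Int :=
  (PySem.List.pyRange left right).foldl
    (fun res i =>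
      match PySem.List.pyGet? s i with
      | some v => res + (right + 1 - firstGt s (target - v) (i + 1) (right + 1))
      | none => res)   -- IndexError in Python: excluded by Pre_two_sum_gt
    0

-- ===== PRECONDITION & SPEC =====
-- Pre_ restricts to the helper's natural domain: either an empty window (right ≤ left,
-- no element is read) or an in-bounds window [left,right] on which s is nondecreasing —
-- the sorted-array assumption this two-pointer helper is written for.  It excludes
-- out-of-range windows (A raises IndexError), negative left (Python wraparound) and
-- unsorted windows, on which A's batch-count value is an artefact of the two-pointer
-- assumption and B's per-index binary-search count legitimately differs.
def Pre_two_sum_gt (s : List Int) (left : Int) (right : Int) (target : Int) : Prop :=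
  right ≤ left ∨
    (0 ≤ left ∧ right < s.length ∧
      ∀ i ∈ List.range s.length, left ≤ (i : Int) → (i : Int) + 1 ≤ right →
        s.getD i 0 ≤ s.getD (i + 1) 0)
instance (s : List Int) (left : Int) (right : Int) (target : Int) : Decidable (Pre_two_sum_gt s left right target) := by unfold Pre_two_sum_gt; infer_instance

def pvWitness_two_sum_gt : List Int × Int × Int × Int := ([1, 2, 2, 5], 0, 3, 4)

def Spec_two_sum_gt (s : List Int) (left : Int) (right : Int) (target : Int) (out : Int) : Prop := out = two_sum_gt_alt s left right target
instance (s : List Int) (left : Int) (right : Int) (target : Int) (out : Int) : Decidable (Spec_two_sum_gt s left right target out) := by unfold Spec_two_sum_gt; infer_instance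

-- ===== CLAIM (what is proved, stated in full; the proofs are below) =====
def Claim_equal_two_sum_gt : Prop := ∀ (s : List Int) (left : Int) (right : Int) (target : Int), Dom_two_sum_gt s left right target → Pre_two_sum_gt s left right target → Spec_two_sum_gt s left right target (two_sum_gt s left right target)

-- ===== LEMMAS AND PROOFS =====

-- the value read at index j (only used at 0 ≤ j < |s|)
def fval (s : List Int) (j : Int) : Int := (PySem.List.pyGet? s j).getD 0

lemma fval_get (s : List Int) {j : Int} (h0 : 0 ≤ j) (h1 : j < s.length) :
    PySem.List.pyGet? s j = some (fval s j) := by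
  rw [PySem.List.pyGet?_eq_some_getElem s h0 h1, fval,
      PySem.List.pyGet?_eq_some_getElem s h0 h1]
  rfl

-- number of j with i < j ≤ r and f i + f j > t
def cntP (f : Int → Int) (t i r : Int) : Int :=
  if i < r then (if t < f i + f r then 1 else 0) + cntP f t i (r - 1) else 0
termination_by (r - i).toNat
decreasing_by omega

-- Σ_{i ∈ [l,r)} cntP f t i r
def sumS (f : Int → Int) (t l r : Int) : Int :=
  if l < r then cntP f t l r + sumS f t (l + 1) r else 0
termination_by (r - l).toNat
decreasing_by omega

-- Σ_{i ∈ [l,r)} [f i + f r > t]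
def tCount (f : Int → Int) (t l r : Int) : Int :=
  if l < r then (if t < f l + f r then 1 else 0) + tCount f t (l + 1) r else 0
termination_by (r - l).toNat
decreasing_by omega

lemma cntP_zero (f : Int → Int) (t : Int) {i r : Int}
    (h : ∀ k, i < k → k ≤ r → f i + f k ≤ t) : cntP f t i r = 0 := by
  by_cases hir : i < r
  · rw [cntP]
    have h1 : ¬ t < f i + f r := not_lt.mpr (h r hir le_rfl)
    have ih : cntP f t i (r - 1) = 0 :=
      cntP_zero f t (fun k hk hk' => h k hk (by omega))
    simp [hir, h1, ih]
  · rw [cntP]; simp [hir]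
termination_by (r - i).toNat
decreasing_by omega

lemma sumS_shrink (f : Int → Int) (t : Int) (l r : Int) :
    sumS f t l r = sumS f t l (r - 1) + tCount f t l r := by
  by_cases hlr : l < r
  · have ih := sumS_shrink f t (l + 1) r
    have hA : sumS f t l r = cntP f t l r + sumS f t (l + 1) r := by
      rw [sumS]; simp [hlr]
    have hC : cntP f t l r = (if t < f l + f r then 1 else 0) + cntP f t l (r - 1) := by
      rw [cntP]; simp [hlr]
    have hT : tCount f t l r = (if t < f l + f r then 1 else 0) + tCount f t (l + 1) r := by
      rw [tCount]; simp [hlr]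
    by_cases h2 : l < r - 1
    · have hB : sumS f t l (r - 1) = cntP f t l (r - 1) + sumS f t (l + 1) (r - 1) := by
        conv_lhs => rw [sumS]
        simp [h2]
      rw [hA, ih, hB, hC, hT]; ring
    · have hB : sumS f t l (r - 1) = 0 := by
        conv_lhs => rw [sumS]
        simp [h2]
      have e1 : cntP f t l (r - 1) = 0 := by rw [cntP]; simp [h2]
      have e2 : sumS f t (l + 1) r = 0 := by rw [sumS]; simp [show ¬ l + 1 < r by omega]
      have e3 : tCount f t (l + 1) r = 0 := by rw [tCount]; simp [show ¬ l + 1 < r by omega]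
      rw [hA, hB, hC, hT, e1, e2, e3]; ring
  · have e2 : sumS f t l (r - 1) = 0 := by
      conv_lhs => rw [sumS]
      all_goals simp [show ¬ l < r - 1 by omega]
    rw [sumS, tCount, e2]; simp [hlr]
termination_by (r - l).toNat
decreasing_by omega

lemma tCount_full (f : Int → Int) (t : Int) {l r : Int} (hlr : l ≤ r)
    (h : ∀ i, l ≤ i → i < r → t < f i + f r) : tCount f t l r = r - l := by
  by_cases h2 : l < r
  · rw [tCount]
    have ih : tCount f t (l + 1) r = r - (l + 1) :=
      tCount_full f t (by omega) (fun i hi hi' => h i (by omega) hi')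
    simp [h2, h l le_rfl h2, ih]; ring
  · rw [tCount]; simp [h2]; omega
termination_by (r - l).toNat
decreasing_by omega

-- A's loop computes sumS, on a sorted in-bounds window
lemma loopA_eq (s : List Int) (t : Int) {l r : Int} (res : Int)
    (h0 : 0 ≤ l) (hr : r < s.length)
    (hmono : ∀ a b : Int, l ≤ a → a ≤ b → b ≤ r → fval s a ≤ fval s b) :
    twoSumGtGo s t l r res = res + sumS (fval s) t l r := by
  by_cases hlr : l < r
  · have hga := fval_get s h0 (by omega)
    have hgb := fval_get s (show (0:Int) ≤ r by omega) hr
    have hS : sumS (fval s) t l r = cntP (fval s) t l r + sumS (fval s) t (l + 1) r := by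
      rw [sumS]; simp [hlr]
    have hG : twoSumGtGo s t l r res =
        if fval s l + fval s r ≤ t then twoSumGtGo s t (l + 1) r res
        else twoSumGtGo s t l (r - 1) (res + (r - l)) := by
      rw [twoSumGtGo]; simp [hlr, hga, hgb]
    by_cases hc : fval s l + fval s r ≤ t
    · have hcnt : cntP (fval s) t l r = 0 :=
        cntP_zero _ _ (fun k hk hk' => by
          have := hmono k r (by omega) hk' le_rfl
          omega)
      have ih := loopA_eq s t (l := l + 1) (r := r) res (by omega) hr
        (fun a b ha hab hb => hmono a b (by omega) hab hb)
      rw [hG, if_pos hc, ih, hS, hcnt]; ring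
    · have ih := loopA_eq s t (l := l) (r := r - 1) (res + (r - l)) h0 (by omega)
        (fun a b ha hab hb => hmono a b ha hab (by omega))
      have htc : tCount (fval s) t l r = r - l :=
        tCount_full _ _ (by omega) (fun i hi hi' => by
          have := hmono l i le_rfl hi (by omega)
          omega)
      have hs := sumS_shrink (fval s) t l r
      rw [hG, if_neg hc, ih]
      omega
  · rw [twoSumGtGo, sumS]; simp [hlr]
termination_by (r - l).toNat
decreasing_by all_goals omega

-- Source B's binary search finds the first index with value > need
lemma firstGt_spec (s : List Int) (need : Int) {lo hi : Int}
    (h0 : 0 ≤ lo) (hn : hi ≤ s.length) (hlh : lo ≤ hi)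
    (hmono : ∀ a b : Int, lo ≤ a → a ≤ b → b ≤ hi - 1 → fval s a ≤ fval s b) :
    lo ≤ firstGt s need lo hi ∧ firstGt s need lo hi ≤ hi ∧
    (∀ k, lo ≤ k → k < firstGt s need lo hi → fval s k ≤ need) ∧
    (∀ k, firstGt s need lo hi ≤ k → k < hi → need < fval s k) := by
  by_cases h : lo < hi
  · have hmid1 := (PySem.Int.le_floordiv_iff_mul_le (a := lo + hi) (b := 2) (q := lo) (by omega)).mpr (by omega)
    have hmid2 := (PySem.Int.floordiv_lt_iff_lt_mul (a := lo + hi) (b := 2) (q := hi) (by omega)).mpr (by omega)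
    set mid := PySem.Int.floordiv (lo + hi) 2 with hmiddef
    have hg := fval_get s (show (0:Int) ≤ mid by omega) (by omega)
    rw [firstGt]
    simp only [h, dif_pos, ← hmiddef, hg]
    by_cases hc : fval s mid ≤ need
    · have ih := firstGt_spec s need (lo := mid + 1) (hi := hi) (by omega) hn (by omega)
        (fun a b ha hab hb => hmono a b (by omega) hab hb)
      simp only [hc, if_pos]
      refine ⟨by omega, ih.2.1, ?_, ih.2.2.2⟩
      intro k hk1 hk2
      by_cases hkm : k ≤ mid
      · exact le_trans (hmono k mid hk1 hkm (by omega)) hc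
      · exact ih.2.2.1 k (by omega) hk2
    · have ih := firstGt_spec s need (lo := lo) (hi := mid) h0 (by omega) (by omega)
        (fun a b ha hab hb => hmono a b ha hab (by omega))
      simp only [hc, if_neg, not_false_iff]
      refine ⟨ih.1, by omega, ih.2.2.1, ?_⟩
      intro k hk1 hk2
      by_cases hkm : k < mid
      · exact ih.2.2.2 k hk1 hkm
      · exact lt_of_lt_of_le (lt_of_not_ge hc) (hmono mid k (by omega) (by omega) (by omega))
  · rw [firstGt]
    simp only [h, dif_neg, not_false_iff]
    exact ⟨le_rfl, hlh, fun k hk1 hk2 => absurd (lt_of_le_of_lt hk1 hk2) (by omega),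
           fun k hk1 hk2 => absurd (lt_of_le_of_lt hk1 hk2) (by omega)⟩
termination_by (hi - lo).toNat
decreasing_by all_goals omega

-- cntP from the first-greater index
lemma cntP_of_firstGt (f : Int → Int) (t : Int) {i r m : Int}
    (h1 : i + 1 ≤ m) (h2 : m ≤ r + 1)
    (hGt : ∀ k, m ≤ k → k ≤ r → t - f i < f k)
    (hLe : ∀ k, i + 1 ≤ k → k < m → f k ≤ t - f i) :
    cntP f t i r = r + 1 - m := by
  by_cases hir : i < r
  · rw [cntP]
    by_cases hm : m ≤ r
    · have ih : cntP f t i (r - 1) = (r - 1) + 1 - m :=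
        cntP_of_firstGt f t h1 (by omega)
          (fun k hk hk' => hGt k hk (by omega)) hLe
      have : t < f i + f r := by have := hGt r hm le_rfl; omega
      simp [hir, this, ih]; ring
    · have hmr : m = r + 1 := by omega
      have hzero : cntP f t i (r - 1) = 0 :=
        cntP_zero f t (fun k hk hk' => by
          have := hLe k (by omega) (by omega); omega)
      have : ¬ t < f i + f r := by
        have := hLe r (by omega) (by omega); omega
      simp [hir, this, hzero]; omega
  · rw [cntP]; simp [hir]; omega
termination_by (r - i).toNat
decreasing_by omega

-- B's fold computes sumS, on a sorted in-bounds window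
lemma foldB_eq (s : List Int) (t : Int) {l r : Int} (res : Int)
    (h0 : 0 ≤ l) (hr : r < s.length)
    (hmono : ∀ a b : Int, l ≤ a → a ≤ b → b ≤ r → fval s a ≤ fval s b) :
    (PySem.List.pyRange l r).foldl
      (fun res i =>
        match PySem.List.pyGet? s i with
        | some v => res + (r + 1 - firstGt s (t - v) (i + 1) (r + 1))
        | none => res) res = res + sumS (fval s) t l r := by
  by_cases hlr : l < r
  · rw [PySem.List.pyRange_one_cons hlr, List.foldl_cons]
    have hg := fval_get s h0 (by omega)
    have hbs := firstGt_spec s (t - fval s l) (lo := l + 1) (hi := r + 1)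
      (by omega) (by omega) (by omega)
      (fun a b ha hab hb => hmono a b (by omega) hab (by omega))
    have hcnt : cntP (fval s) t l r = r + 1 - firstGt s (t - fval s l) (l + 1) (r + 1) :=
      cntP_of_firstGt (fval s) t hbs.1 hbs.2.1
        (fun k hk hk' => hbs.2.2.2 k hk (by omega))
        (fun k hk hk' => hbs.2.2.1 k hk hk')
    have ih := foldB_eq s t (l := l + 1) (r := r)
      (res + (r + 1 - firstGt s (t - fval s l) (l + 1) (r + 1))) (by omega) hr
      (fun a b ha hab hb => hmono a b (by omega) hab hb)
    rw [sumS]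
    simp only [hg, hlr, if_pos]
    rw [ih, hcnt]; ring
  · have : PySem.List.pyRange l r = [] := by
      rw [PySem.List.pyRange_one]
      simp [show (r - l).toNat = 0 by omega]
    rw [this, sumS]; simp [hlr]
termination_by (r - l).toNat
decreasing_by omega

-- adjacent sortedness gives monotonicity of fval on the window
lemma mono_of_adj (s : List Int) {left right : Int}
    (h0 : 0 ≤ left) (hr : right < s.length)
    (hadj : ∀ i ∈ List.range s.length, left ≤ (i : Int) → (i : Int) + 1 ≤ right →
      s.getD i 0 ≤ s.getD (i + 1) 0) :
    ∀ a b : Int, left ≤ a → a ≤ b → b ≤ right → fval s a ≤ fval s b := by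
  have step : ∀ j : Int, left ≤ j → j + 1 ≤ right → fval s j ≤ fval s (j + 1) := by
    intro j hj hj'
    have hjn : j.toNat < s.length := by omega
    have hjn' : j.toNat + 1 < s.length := by omega
    have h1 := hadj j.toNat (List.mem_range.mpr hjn) (by omega) (by omega)
    have e1 : fval s j = s.getD j.toNat 0 := by
      rw [fval, fval_get s (by omega) (by omega), fval,
          PySem.List.pyGet?_eq_some_getElem s (by omega) (by omega)]
      simp [List.getD_eq_getElem?_getD, List.getElem?_eq_getElem hjn]
    have e2 : fval s (j + 1) = s.getD (j.toNat + 1) 0 := by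
      rw [fval, PySem.List.pyGet?_eq_some_getElem s (by omega) (by omega)]
      have : (j + 1).toNat = j.toNat + 1 := by omega
      simp [this, List.getD_eq_getElem?_getD, List.getElem?_eq_getElem hjn']
    rw [e1, e2]; exact h1
  intro a b ha hab hb
  obtain ⟨d, hd⟩ : ∃ d : Nat, b = a + d := ⟨(b - a).toNat, by omega⟩
  subst hd
  clear hab
  induction d with
  | zero => simp
  | succ k ih =>
    have hk : a + (k : Int) ≤ right - 1 := by push_cast at hb ⊢; omega
    refine le_trans (ih (by push_cast at hb ⊢; omega)) ?_
    have := step (a + (k : Int)) (by omega) (by omega)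
    have ecast : ((k + 1 : Nat) : Int) = (k : Int) + 1 := by push_cast; ring
    rw [ecast, ← add_assoc]
    exact this

-- ===== VERDICT (by name: the statement is the Claim_ definition above) =====
theorem two_sum_gt_spec : Claim_equal_two_sum_gt := by
  intro s left right target _ hpre
  unfold Spec_two_sum_gt two_sum_gt two_sum_gt_alt
  rcases hpre with hle | ⟨h0, hr, hadj⟩
  · rw [twoSumGtGo]
    have : PySem.List.pyRange left right = [] := by
      rw [PySem.List.pyRange_one]
      simp [show (right - left).toNat = 0 by omega]
    rw [this]
    simp [show ¬ left < right by omega]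
  · have hmono := mono_of_adj s h0 hr hadj
    rw [loopA_eq s target 0 h0 hr hmono, foldB_eq s target 0 h0 hr hmono]
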